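-- pv_equiv track=rewrite | github.com/havegrit/Algorithm | 프로그래머스/0/120922. 종이 자르기/종이 자르기.py | solution
-- ===== SOURCE A (Python) =====
-- def solution(M, N):
--     answer = 0
--
--     if M == 1 and N == 1:
--         return 0
--     elif M != 1:
--         answer += solution(M // 2, N) + solution(M - M // 2, N) + 1
--     elif N != 1:
--         answer += solution(M, N // 2) + solution(M, N - N // 2) + 1
--
--     return answer
-- ===== SOURCE B (Python) =====
-- def solution(M, N):
--     # The paper has positive integer dimensions.
--     if M < 1 or N < 1:
--         raise ValueError("paper dimensions must be positive")
--     # Every cut splits one piece into two, so reaching M*N unit squares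
--     # from 1 piece takes exactly M*N - 1 cuts, regardless of cutting order.
--     return M * N - 1
-- ===== Notes on version B (the rewrite author's own statement) =====
-- stated objective: faster
-- what changed: Replaced A's divide-and-conquer recursion over both dimensions by the closed form M*N - 1 (each cut adds exactly one piece).
import Mathlib
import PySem

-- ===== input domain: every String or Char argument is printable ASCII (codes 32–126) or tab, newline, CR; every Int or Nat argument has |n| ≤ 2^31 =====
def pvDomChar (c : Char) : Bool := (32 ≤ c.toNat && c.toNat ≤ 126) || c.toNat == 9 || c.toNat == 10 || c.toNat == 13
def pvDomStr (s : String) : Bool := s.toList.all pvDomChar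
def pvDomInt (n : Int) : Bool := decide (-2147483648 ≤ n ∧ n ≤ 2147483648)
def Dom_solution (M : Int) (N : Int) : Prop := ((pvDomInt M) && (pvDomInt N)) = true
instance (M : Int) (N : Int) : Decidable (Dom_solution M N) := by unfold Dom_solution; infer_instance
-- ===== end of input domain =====

-- B replaces A's divide-and-conquer recursion by the closed form M*N - 1 (asymptotically faster).

-- ===== PORT A =====
-- A's recursion, transliterated; the Nat fuel only makes it total (it never runs
-- out on inputs admitted by Pre_solution, where the recursion depth is bounded).
def solutionFuel : Nat → Int → Int → Int
  | 0, _, _ => 0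
  | fuel + 1, M, N =>
    if M = 1 ∧ N = 1 then 0
    else if M ≠ 1 then
      solutionFuel fuel (PySem.Int.floordiv M 2) N
        + solutionFuel fuel (M - PySem.Int.floordiv M 2) N + 1
    else if N ≠ 1 then
      solutionFuel fuel M (PySem.Int.floordiv N 2)
        + solutionFuel fuel M (N - PySem.Int.floordiv N 2) + 1
    else 0

def solution (M : Int) (N : Int) : Int := solutionFuel (M.toNat + N.toNat) M N

-- ===== PORT B =====
-- B raises ValueError when M < 1 or N < 1 (outside Pre_solution; nothing is claimed there):
-- the port returns the formula's value on the validated branch.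
def solution_alt (M : Int) (N : Int) : Int := M * N - 1

-- ===== PRECONDITION & SPEC =====
-- A recurses forever (Python: RecursionError) unless both dimensions are ≥ 1.
def Pre_solution (M : Int) (N : Int) : Prop := 1 ≤ M ∧ 1 ≤ N
instance (M : Int) (N : Int) : Decidable (Pre_solution M N) := by unfold Pre_solution; infer_instance
def pvWitness_solution : Int × Int := (2, 3)

def Spec_solution (M : Int) (N : Int) (out : Int) : Prop := out = solution_alt M N
instance (M : Int) (N : Int) (out : Int) : Decidable (Spec_solution M N out) := by unfold Spec_solution; infer_instance

-- ===== CLAIM (what is proved, stated in full; the proofs are below) =====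
def Claim_equal_solution : Prop := ∀ (M : Int) (N : Int), Dom_solution M N → Pre_solution M N → Spec_solution M N (solution M N)

-- ===== LEMMAS AND PROOFS =====
theorem solutionFuel_closed (fuel : Nat) (M N : Int) (hM : 1 ≤ M) (hN : 1 ≤ N)
    (hf : M.toNat + N.toNat ≤ fuel) : solutionFuel fuel M N = M * N - 1 := by
  induction fuel generalizing M N with
  | zero => omega
  | succ f ih =>
    rw [solutionFuel]
    rw [PySem.Int.floordiv_eq_ediv_of_pos (a := M) (by norm_num),
        PySem.Int.floordiv_eq_ediv_of_pos (a := N) (by norm_num)]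
    by_cases h1 : M = 1 ∧ N = 1
    · simp [h1]
    · by_cases hM1 : M ≠ 1
      · have h2 : 2 ≤ M := by omega
        rw [if_neg h1, if_pos hM1,
            ih (M / 2) N (by omega) hN (by omega),
            ih (M - M / 2) N (by omega) hN (by omega)]
        ring
      · have hMe : M = 1 := by omega
        have hN1 : N ≠ 1 := by tauto
        have h2 : 2 ≤ N := by omega
        rw [if_neg h1, if_neg hM1, if_pos hN1,
            ih M (N / 2) hM (by omega) (by omega),
            ih M (N - N / 2) hM (by omega) (by omega)]
        ring

-- ===== VERDICT (by name: the statement is the Claim_ definition above) =====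
theorem solution_spec : Claim_equal_solution := by
  intro M N _ hPre
  exact solutionFuel_closed _ M N hPre.1 hPre.2 le_rfl
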